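-- pv_equiv track=rewrite | github.com/NetManAIOps/LogParse | getVocab.py | get_word_context
-- ===== SOURCE A (Python) =====
-- def get_word_context(word_list, word_index, context_num):
--     '''get the context of a word from the word list of a log
--
--     Args:
--     --------
--     word_list: a list of words in the log
--     word_index: the target word's index in the list
--     context_num: list of the number of words to choose in the context, [preceding, succeeding]
--
--     Returns:
--     --------
--     word_context: a tuple of word context, with the first one to be the target word itself
--     '''
--     target_word = word_list[word_index]
--     word_context = [target_word]
--     for i in range(word_index-context_num[0], word_index+context_num[1]+1):
--         if not i == word_index:
--             if i>=0 and i<len(word_list):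
--                 word_context.append(word_list[i])
--             else:
--                 word_context.append("")
--     return tuple(word_context)
-- ===== SOURCE B (Python) =====
-- def get_word_context(word_list, word_index, context_num):
--     """Slice-and-pad reimplementation: take the target, then the in-range
--     neighbours by one list slice, and pad with "" for window positions that
--     fall outside the list.  Negative word_index is first normalised with %,
--     so the context is taken around the word the index actually denotes."""
--     target = word_list[word_index]
--     n = len(word_list)
--     j = word_index % n
--     lo = j - context_num[0]
--     hi = j + context_num[1] + 1
--     mid = word_list[max(lo, 0):max(hi, 0)]
--     if lo <= j < hi:
--         del mid[j - max(lo, 0)]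
--     return tuple([target]
--                  + [""] * max(0, min(hi, 0) - lo)
--                  + mid
--                  + [""] * max(0, hi - max(lo, n)))
-- ===== Notes on version B (the rewrite author's own statement) =====
-- stated objective: simpler
-- what changed: Replaces A's index-by-index loop over the window (with a skip-and-bounds check per index) by one list slice for the in-range neighbours plus arithmetic pad counts of "" on each side; B also normalises a negative word_index with % before building the window.
-- intended difference: For a negative word_index (Python wraparound) with a nonempty requested window, A takes the target word by wraparound but builds the context from the literal negative indices (mostly "" padding or words unrelated to the target), while B builds the window around the position the index actually denotes, which is the intended context of that word. — e.g. on get_word_context(["a", "b"], -1, [1, 1]): A returns ["b", "", "a"], B returns ["b", "a", ""]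
import Mathlib
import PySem

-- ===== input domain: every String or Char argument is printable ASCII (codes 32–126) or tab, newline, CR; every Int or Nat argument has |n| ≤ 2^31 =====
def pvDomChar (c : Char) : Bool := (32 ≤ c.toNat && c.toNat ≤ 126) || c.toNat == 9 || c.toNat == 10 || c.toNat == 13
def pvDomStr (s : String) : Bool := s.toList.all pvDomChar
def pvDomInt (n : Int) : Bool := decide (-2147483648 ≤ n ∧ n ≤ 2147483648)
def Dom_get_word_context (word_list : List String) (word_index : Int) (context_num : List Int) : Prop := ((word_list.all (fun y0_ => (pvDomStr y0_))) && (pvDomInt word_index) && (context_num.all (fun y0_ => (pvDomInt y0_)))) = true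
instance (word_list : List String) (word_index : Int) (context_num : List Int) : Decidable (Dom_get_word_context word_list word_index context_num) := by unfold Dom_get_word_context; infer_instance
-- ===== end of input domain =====

-- B rebuilds the context window by one list slice plus arithmetic "" pad counts instead of
-- A's index-by-index loop (objective: simpler decomposition; no speed claim).

-- ===== PORT A =====
def get_word_context (word_list : List String) (word_index : Int) (context_num : List Int) : List String :=
  let target_word := PySem.List.pyGetD word_list word_index ""
  let c0 := PySem.List.pyGetD context_num 0 0
  let c1 := PySem.List.pyGetD context_num 1 0
  (PySem.List.pyRange (word_index - c0) (word_index + c1 + 1) 1).foldl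
    (fun word_context i =>
      if i ≠ word_index then
        if 0 ≤ i ∧ i < (word_list.length : Int) then
          word_context ++ [PySem.List.pyGetD word_list i ""]
        else
          word_context ++ [""]
      else word_context)
    [target_word]

-- ===== PORT B =====
def get_word_context_alt (word_list : List String) (word_index : Int) (context_num : List Int) : List String :=
  let target := PySem.List.pyGetD word_list word_index ""
  let n : Int := word_list.length
  let j := PySem.Int.mod word_index n
  let lo := j - PySem.List.pyGetD context_num 0 0
  let hi := j + PySem.List.pyGetD context_num 1 0 + 1
  let mid0 := PySem.List.slice word_list (some (max lo 0)) (some (max hi 0))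
  let mid := if lo ≤ j ∧ j < hi then mid0.eraseIdx (j - max lo 0).toNat else mid0
  [target] ++ List.replicate (max 0 (min hi 0 - lo)).toNat "" ++ mid
    ++ List.replicate (max 0 (hi - max lo n)).toNat ""

-- ===== PRECONDITION & SPEC =====
-- Pre_ excludes exactly the inputs on which A raises: an IndexError on word_list[word_index]
-- or on context_num[0]/context_num[1].
def Pre_get_word_context (word_list : List String) (word_index : Int) (context_num : List Int) : Prop :=
  PySem.Raise.InRange word_list.length word_index ∧ 2 ≤ context_num.length
instance (word_list : List String) (word_index : Int) (context_num : List Int) : Decidable (Pre_get_word_context word_list word_index context_num) := by unfold Pre_get_word_context; infer_instance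

def pvWitness_get_word_context : List String × Int × List Int := (["a", "b"], 0, [1, 1])

-- On a negative word_index (Python wraparound) with a nonempty requested window, A takes the
-- target by wraparound but builds the context from the literal negative indices (mostly ""
-- padding, or words unrelated to the target), while B builds the window around the position
-- the index actually denotes, which is the intended context of that word.
def D_get_word_context (word_list : List String) (word_index : Int) (context_num : List Int) : Prop :=
  word_index < 0 ∧ (0 < context_num.getD 0 0 ∨ 0 < context_num.getD 1 0) ∧
    0 ≤ context_num.getD 0 0 + context_num.getD 1 0
instance (word_list : List String) (word_index : Int) (context_num : List Int) : Decidable (D_get_word_context word_list word_index context_num) := by unfold D_get_word_context; infer_instance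

def Spec_get_word_context (word_list : List String) (word_index : Int) (context_num : List Int) (out : List String) : Prop := ¬ D_get_word_context word_list word_index context_num → out = get_word_context_alt word_list word_index context_num
instance (word_list : List String) (word_index : Int) (context_num : List Int) (out : List String) : Decidable (Spec_get_word_context word_list word_index context_num out) := by unfold Spec_get_word_context; infer_instance

def pvDiffWitness_get_word_context : List String × Int × List Int := (["a", "b"], -1, [1, 1])
def pvDiffWitnessOut_get_word_context : (List String) × (List String) := (["b", "", "a"], ["b", "a", ""])

-- ===== CLAIM (what is proved, stated in full; the proofs are below) =====
def Claim_unchanged_get_word_context : Prop := ∀ (word_list : List String) (word_index : Int) (context_num : List Int), Dom_get_word_context word_list word_index context_num → Pre_get_word_context word_list word_index context_num → Spec_get_word_context word_list word_index context_num (get_word_context word_list word_index context_num)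
def Claim_changed_get_word_context : Prop := Dom_get_word_context (pvDiffWitness_get_word_context.1) (pvDiffWitness_get_word_context.2.1) (pvDiffWitness_get_word_context.2.2) ∧ Pre_get_word_context (pvDiffWitness_get_word_context.1) (pvDiffWitness_get_word_context.2.1) (pvDiffWitness_get_word_context.2.2) ∧ D_get_word_context (pvDiffWitness_get_word_context.1) (pvDiffWitness_get_word_context.2.1) (pvDiffWitness_get_word_context.2.2) ∧ get_word_context (pvDiffWitness_get_word_context.1) (pvDiffWitness_get_word_context.2.1) (pvDiffWitness_get_word_context.2.2) = pvDiffWitnessOut_get_word_context.1 ∧ get_word_context_alt (pvDiffWitness_get_word_context.1) (pvDiffWitness_get_word_context.2.1) (pvDiffWitness_get_word_context.2.2) = pvDiffWitnessOut_get_word_context.2 ∧ pvDiffWitnessOut_get_word_context.1 ≠ pvDiffWitnessOut_get_word_context.2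

-- ===== LEMMAS AND PROOFS =====

-- the value A appends for window index i: the word when i is in range, "" otherwise
def pvF (xs : List String) : Int → String :=
  fun i => if 0 ≤ i ∧ i < (xs.length : Int) then PySem.List.pyGetD xs i "" else ""

-- the window segment [a, b) rendered by pvF
def pvM (xs : List String) (a b : Int) : List String := (PySem.List.pyRange a b 1).map (pvF xs)

theorem pvM_nil (xs : List String) {a b : Int} (h : b ≤ a) : pvM xs a b = [] := by
  simp [pvM, PySem.List.pyRange_one_eq_nil h]

theorem pvM_append (xs : List String) {a m b : Int} (h1 : a ≤ m) (h2 : m ≤ b) :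
    pvM xs a b = pvM xs a m ++ pvM xs m b := by
  simp [pvM, PySem.List.pyRange_one_append a m b h1 h2]

theorem pvM_neg (xs : List String) {a b : Int} (hb : b ≤ 0) :
    pvM xs a b = List.replicate (b - a).toNat "" := by
  rw [List.eq_replicate_iff]
  constructor
  · simp [pvM, PySem.List.length_pyRange_one]
  · intro s hs
    simp only [pvM, List.mem_map] at hs
    obtain ⟨i, hi, rfl⟩ := hs
    rw [PySem.List.mem_pyRange_one] at hi
    simp only [pvF, if_neg (by omega : ¬(0 ≤ i ∧ i < (xs.length : Int)))]

theorem pvM_ge (xs : List String) {a b : Int} (ha : (xs.length : Int) ≤ a) :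
    pvM xs a b = List.replicate (b - a).toNat "" := by
  rw [List.eq_replicate_iff]
  constructor
  · simp [pvM, PySem.List.length_pyRange_one]
  · intro s hs
    simp only [pvM, List.mem_map] at hs
    obtain ⟨i, hi, rfl⟩ := hs
    rw [PySem.List.mem_pyRange_one] at hi
    simp only [pvF, if_neg (by omega : ¬(0 ≤ i ∧ i < (xs.length : Int)))]

theorem pvSlice_eq (xs : List String) (a b : Int) (ha : 0 ≤ a) (hb : 0 ≤ b) :
    PySem.List.slice xs (some a) (some b)
      = pvM xs (min a (xs.length : Int)) (min b (xs.length : Int)) := by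
  rw [PySem.List.slice_toNat xs ha hb]
  apply List.ext_getElem
  · simp [pvM, PySem.List.length_pyRange_one]
    omega
  · intro k h1 h2
    have hlen : k < xs.length - a.toNat := by
      simp at h1; omega
    have hk : a.toNat + k < xs.length := by omega
    have hmem : (min a (xs.length : Int)) + k < (xs.length : Int) := by
      simp [pvM, PySem.List.length_pyRange_one] at h2; omega
    simp only [pvM, List.getElem_map, PySem.List.getElem_pyRange_one, List.getElem_take,
      List.getElem_drop, pvF]
    rw [if_pos (by omega)]
    rw [PySem.List.pyGetD_eq_getElem xs "" (by omega) hmem]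
    congr 1
    omega

theorem pvEraseIdx_append {α : Type} (y : α) (ys : List α) :
    ∀ xs : List α, (xs ++ y :: ys).eraseIdx xs.length = xs ++ ys := by
  intro xs; induction xs with
  | nil => simp
  | cons a t ih => simp [ih]

theorem pvFoldA (xs : List String) (w : Int) :
    ∀ (l : List Int) (acc : List String),
      l.foldl
        (fun word_context i =>
          if i ≠ w then
            if 0 ≤ i ∧ i < (xs.length : Int) then
              word_context ++ [PySem.List.pyGetD xs i ""]
            else
              word_context ++ [""]
          else word_context) acc
      = acc ++ (l.filter (fun i => decide (i ≠ w))).map (pvF xs) := by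
  intro l
  induction l with
  | nil => intro acc; simp
  | cons i t ih =>
    intro acc
    rw [List.foldl_cons, List.filter_cons]
    by_cases hi : i = w
    · rw [if_neg (by simp [hi] : ¬ (i ≠ w)), if_neg (by simp [hi])]
      exact ih acc
    · rw [if_pos (show i ≠ w from hi), if_pos (show decide (i ≠ w) = true by simpa using hi),
        List.map_cons]
      by_cases hr : 0 ≤ i ∧ i < (xs.length : Int)
      · rw [if_pos hr, ih]
        simp [pvF, hr]
      · rw [if_neg hr, ih]
        simp [pvF, hr]

theorem pvFilter_out {a b w : Int} (h : ¬(a ≤ w ∧ w < b)) :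
    (PySem.List.pyRange a b 1).filter (fun i => decide (i ≠ w)) = PySem.List.pyRange a b 1 := by
  apply List.filter_eq_self.mpr
  intro i hi
  rw [PySem.List.mem_pyRange_one] at hi
  simp; omega

theorem pvFilter_in {a b w : Int} (haw : a ≤ w) (hwb : w < b) :
    (PySem.List.pyRange a b 1).filter (fun i => decide (i ≠ w))
      = PySem.List.pyRange a w 1 ++ PySem.List.pyRange (w + 1) b 1 := by
  rw [PySem.List.pyRange_one_append a w b haw (by omega), PySem.List.pyRange_one_cons hwb,
    List.filter_append, List.filter_cons]
  rw [show (decide (w ≠ w)) = false by simp]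
  rw [List.filter_eq_self.mpr (by
      intro i hi; rw [PySem.List.mem_pyRange_one] at hi; simpa using (by omega : i ≠ w)),
    List.filter_eq_self.mpr (by
      intro i hi; rw [PySem.List.mem_pyRange_one] at hi; simpa using (by omega : i ≠ w))]
  simp

-- core: A's rendered-and-filtered window equals B's pad/slice/pad assembly, for any
-- in-range centre w and any window bounds lo, hi
theorem pvCore (xs : List String) (lo hi w : Int) (h0 : 0 ≤ w) (h1 : w < (xs.length : Int)) :
    ((PySem.List.pyRange lo hi 1).filter (fun i => decide (i ≠ w))).map (pvF xs)
      = List.replicate (max 0 (min hi 0 - lo)).toNat ""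
        ++ (if lo ≤ w ∧ w < hi
            then (PySem.List.slice xs (some (max lo 0)) (some (max hi 0))).eraseIdx
                   (w - max lo 0).toNat
            else PySem.List.slice xs (some (max lo 0)) (some (max hi 0)))
        ++ List.replicate (max 0 (hi - max lo (xs.length : Int))).toNat "" := by
  have hn : (0 : Int) ≤ (xs.length : Int) := by positivity
  set n : Int := (xs.length : Int) with hn_def
  have hrep1 : List.replicate (max 0 (min hi 0 - lo)).toNat ""
      = pvM xs lo (max lo (min hi 0)) := by
    by_cases hlo : lo ≤ 0
    · rw [pvM_neg xs (by omega : max lo (min hi 0) ≤ 0)]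
      congr 1; omega
    · rw [(by omega : max lo (min hi 0) = lo), pvM_nil xs le_rfl]
      rw [(by omega : max 0 (min hi 0 - lo) = 0)]
      simp
  have hrep2 : List.replicate (max 0 (hi - max lo n)).toNat ""
      = pvM xs (min hi (max lo n)) hi := by
    by_cases hhi : max lo n ≤ hi
    · rw [(by omega : min hi (max lo n) = max lo n),
        pvM_ge xs (by omega : n ≤ max lo n)]
      congr 1
      omega
    · rw [pvM_nil xs (by omega), (by omega : max 0 (hi - max lo n) = 0)]
      simp
  have hmid : PySem.List.slice xs (some (max lo 0)) (some (max hi 0))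
      = pvM xs (max lo (min hi 0)) (min hi (max lo n)) := by
    rw [pvSlice_eq xs _ _ (by omega) (by omega)]
    by_cases hcase : hi ≤ 0 ∨ n ≤ lo
    · rw [pvM_nil xs (by omega), pvM_nil xs (by omega)]
    · rw [(by omega : min (max lo 0) n = max lo (min hi 0)),
        (by omega : min (max hi 0) n = min hi (max lo n))]
  by_cases hlohi : hi ≤ lo
  · rw [PySem.List.pyRange_one_eq_nil hlohi]
    rw [if_neg (by omega), hmid, pvM_nil xs (by omega),
      (by omega : max 0 (min hi 0 - lo) = 0), (by omega : max 0 (hi - max lo n) = 0)]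
    simp
  · push Not at hlohi
    set m1 := max lo (min hi 0) with hm1
    set m2 := min hi (max lo n) with hm2
    have hchain : lo ≤ m1 ∧ m1 ≤ m2 ∧ m2 ≤ hi := by omega
    by_cases hskip : lo ≤ w ∧ w < hi
    · have hwm : m1 ≤ w ∧ w < m2 := by omega
      rw [pvFilter_in hskip.1 hskip.2, List.map_append]
      have hL : (PySem.List.pyRange lo w 1).map (pvF xs) = pvM xs lo m1 ++ pvM xs m1 w := by
        rw [← pvM_append xs hchain.1 (by omega)]; rfl
      have hR : (PySem.List.pyRange (w + 1) hi 1).map (pvF xs)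
          = pvM xs (w + 1) m2 ++ pvM xs m2 hi := by
        rw [← pvM_append xs (by omega) (by omega)]; rfl
      rw [hL, hR, if_pos hskip, hmid, hrep1, hrep2]
      have hsplit : pvM xs m1 m2 = pvM xs m1 w ++ pvF xs w :: pvM xs (w + 1) m2 := by
        rw [pvM_append xs (show m1 ≤ w by omega) (show w ≤ m2 by omega)]
        congr 1
        simp [pvM, PySem.List.pyRange_one_cons (by omega : w < m2)]
      rw [hsplit]
      have hidx : (w - max lo 0).toNat = (pvM xs m1 w).length := by
        simp [pvM, PySem.List.length_pyRange_one]
        omega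
      rw [hidx, pvEraseIdx_append]
      simp [List.append_assoc]
    · rw [pvFilter_out hskip, if_neg hskip, hmid, hrep1, hrep2]
      rw [show (PySem.List.pyRange lo hi 1).map (pvF xs) = pvM xs lo hi from rfl,
        pvM_append xs hchain.1 (by omega), pvM_append xs hchain.2.1 hchain.2.2]
      simp [List.append_assoc]

theorem pvMod_nonneg (a : Int) (n : Nat) (h1 : 0 ≤ a) (h2 : a < n) :
    PySem.Int.mod a (n : Int) = a := by
  rw [PySem.Int.mod_eq_emod_of_pos (by omega)]
  exact Int.emod_eq_of_lt h1 h2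

theorem pvMod_neg (a : Int) (n : Nat) (h1 : -(n : Int) ≤ a) (h2 : a < 0) :
    PySem.Int.mod a (n : Int) = a + n := by
  rw [PySem.Int.mod_eq_emod_of_pos (by omega)]
  have h3 : a % (n : Int) = (a + (n : Int) * 1) % n :=
    (Int.add_mul_emod_self_left (a := a) (b := (n : Int)) (c := 1)).symm
  rw [h3, mul_one]
  exact Int.emod_eq_of_lt (by omega) (by omega)

-- ===== VERDICT (by name: the statement is the Claim_ definition above) =====
theorem get_word_context_spec : Claim_unchanged_get_word_context := by
  intro wl wi cn _hDom hPre hnD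
  obtain ⟨hIn, hlen⟩ := hPre
  obtain ⟨hwlo, hwhi⟩ : -(wl.length : Int) ≤ wi ∧ wi < (wl.length : Int) := hIn
  have hc0 : PySem.List.pyGetD cn 0 0 = cn.getD 0 0 := PySem.List.pyGetD_zero cn 0
  have hc1 : PySem.List.pyGetD cn 1 0 = cn.getD 1 0 := by
    rw [PySem.List.pyGetD_eq_getElem cn 0 (by omega)
      (by exact_mod_cast (by omega : 1 < cn.length))]
    simp [List.getD_eq_getElem?_getD, List.getElem?_eq_getElem (by omega : 1 < cn.length)]
  show get_word_context wl wi cn = get_word_context_alt wl wi cn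
  unfold get_word_context get_word_context_alt
  dsimp only
  rw [pvFoldA wl wi, hc0, hc1]
  by_cases hw : 0 ≤ wi
  · -- nonnegative index: the two windows coincide
    rw [pvMod_nonneg wi wl.length hw hwhi,
      pvCore wl (wi - cn.getD 0 0) (wi + cn.getD 1 0 + 1) wi hw hwhi]
    simp [List.append_assoc]
  · -- negative index, outside D_: the requested window is empty on both sides
    rw [pvMod_neg wi wl.length hwlo (by omega)]
    unfold D_get_word_context at hnD
    by_cases hsum : cn.getD 0 0 + cn.getD 1 0 < 0
    · -- empty range on both sides
      rw [PySem.List.pyRange_one_eq_nil (by omega)]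
      rw [if_neg (by omega : ¬(wi + (wl.length : Int) - cn.getD 0 0 ≤ wi + (wl.length : Int) ∧
            wi + (wl.length : Int) < wi + (wl.length : Int) + cn.getD 1 0 + 1))]
      rw [pvSlice_eq wl _ _ (by omega) (by omega),
        pvM_nil wl (by omega), (by omega : max 0 (min (wi + (wl.length : Int) + cn.getD 1 0 + 1) 0 - (wi + (wl.length : Int) - cn.getD 0 0)) = 0),
        (by omega : max 0 (wi + (wl.length : Int) + cn.getD 1 0 + 1 - max (wi + (wl.length : Int) - cn.getD 0 0) (wl.length : Int)) = 0)]
      simp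
    · -- then c0 = c1 = 0: the window holds only the skipped target position
      have h00 : cn.getD 0 0 = 0 ∧ cn.getD 1 0 = 0 := by
        by_cases hpos : 0 < cn.getD 0 0 ∨ 0 < cn.getD 1 0
        · exact absurd ⟨by omega, hpos, by omega⟩ hnD
        · omega
      rw [h00.1, h00.2]
      simp only [sub_zero, add_zero]
      rw [pvFilter_in (le_refl wi) (show wi < wi + 1 by omega)]
      rw [PySem.List.pyRange_one_eq_nil (le_refl wi),
        PySem.List.pyRange_one_eq_nil (le_refl (wi + 1))]
      rw [if_pos (show wi + (wl.length : Int) ≤ wi + (wl.length : Int) ∧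
            wi + (wl.length : Int) < wi + (wl.length : Int) + 1 by omega)]
      rw [pvSlice_eq wl _ _ (by omega) (by omega)]
      rw [(by omega : min (max (wi + (wl.length : Int)) 0) (wl.length : Int) = wi + (wl.length : Int)),
        (by omega : min (max (wi + (wl.length : Int) + 1) 0) (wl.length : Int) = wi + (wl.length : Int) + 1)]
      rw [show pvM wl (wi + (wl.length : Int)) (wi + (wl.length : Int) + 1)
            = [pvF wl (wi + (wl.length : Int))] by
          simp [pvM, PySem.List.pyRange_one_cons (show wi + (wl.length : Int) < wi + (wl.length : Int) + 1 by omega),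
            PySem.List.pyRange_one_eq_nil (le_refl (wi + (wl.length : Int) + 1))]]
      rw [(by omega : (wi + (wl.length : Int) - max (wi + (wl.length : Int)) 0).toNat = 0)]
      rw [(by omega : max 0 (min (wi + (wl.length : Int) + 1) 0 - (wi + (wl.length : Int))) = 0),
        (by omega : max 0 (wi + (wl.length : Int) + 1 - max (wi + (wl.length : Int)) (wl.length : Int)) = 0)]
      simp

theorem get_word_context_changed : Claim_changed_get_word_context := by
  unfold Claim_changed_get_word_context; decide
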